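-- pv_equiv track=rewrite | github.com/faiz-DS/Assignment-8-DSA | DSA Assignment 8.py | can_swap_to_goal
-- ===== SOURCE A (Python) =====
-- def can_swap_to_goal(s, goal):
--     if len(s) != len(goal):
--         return False
--
--     diff_count = 0
--     diff_indices = []
--
--     for i in range(len(s)):
--         if s[i] != goal[i]:
--             diff_count += 1
--             diff_indices.append(i)
--
--         if diff_count > 2:
--             return False
--
--     return diff_count == 2 and s[diff_indices[0]] == goal[diff_indices[1]] and s[diff_indices[1]] == goal[diff_indices[0]]
-- ===== SOURCE B (Python) =====
-- def can_swap_to_goal(s, goal):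
--     if len(s) != len(goal):
--         return False
--     diffs = [(a, b) for a, b in zip(s, goal) if a != b]
--     return len(diffs) == 2 and sorted(s) == sorted(goal)
-- ===== Notes on version B (the rewrite author's own statement) =====
-- stated objective: alternative
-- what changed: B replaces A's index bookkeeping (saved mismatch indices, early-exit counter, crosswise indexed comparison) with a zip comprehension collecting mismatched character pairs and decides swap-feasibility as 'exactly two mismatches and sorted(s) == sorted(goal)' (equal character multisets).
import Mathlib
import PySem

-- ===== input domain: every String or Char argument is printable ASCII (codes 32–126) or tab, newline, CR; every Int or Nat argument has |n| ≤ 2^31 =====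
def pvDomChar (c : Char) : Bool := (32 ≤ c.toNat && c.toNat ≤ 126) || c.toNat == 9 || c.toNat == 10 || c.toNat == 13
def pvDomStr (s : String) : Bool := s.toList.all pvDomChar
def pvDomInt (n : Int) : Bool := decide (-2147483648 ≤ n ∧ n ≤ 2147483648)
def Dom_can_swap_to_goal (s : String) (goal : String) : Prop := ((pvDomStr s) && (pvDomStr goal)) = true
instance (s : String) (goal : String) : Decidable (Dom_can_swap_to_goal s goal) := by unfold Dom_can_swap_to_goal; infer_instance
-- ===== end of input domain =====

-- B decides swap-feasibility as "exactly two mismatched positions and equal sorted strings",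
-- replacing A's saved-indices crosswise comparison (objective: alternative characterization).

-- ===== PORT A =====
-- A's final 'return' line; pyGetD is exact here because the 'and' chain only reads
-- diff_indices[0]/diff_indices[1] when diff_count == 2 (Python short-circuit), and then
-- the two stored indices are valid indices of s and goal.
def pvFinalA (S G : List Char) (dc : Int) (di : List Int) : Bool :=
  decide (dc = 2) &&
    (PySem.List.pyGetD S (PySem.List.pyGetD di 0 0) ' ' == PySem.List.pyGetD G (PySem.List.pyGetD di 1 0) ' ') &&
    (PySem.List.pyGetD S (PySem.List.pyGetD di 1 0) ' ' == PySem.List.pyGetD G (PySem.List.pyGetD di 0 0) ' ')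

-- the 'for i in range(len(s))' loop with state (diff_count, diff_indices) and early return False
def pvLoopA (S G : List Char) (is : List Int) (dc : Int) (di : List Int) : Bool :=
  match is with
  | [] => pvFinalA S G dc di
  | i :: rest =>
    let dc' := if PySem.List.pyGetD S i ' ' ≠ PySem.List.pyGetD G i ' ' then dc + 1 else dc
    let di' := if PySem.List.pyGetD S i ' ' ≠ PySem.List.pyGetD G i ' ' then di ++ [i] else di
    if dc' > 2 then false else pvLoopA S G rest dc' di'

def can_swap_to_goal (s : String) (goal : String) : Bool :=
  if PySem.Str.len s ≠ PySem.Str.len goal then false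
  else pvLoopA s.toList goal.toList (PySem.List.pyRange 0 (PySem.Str.len s) 1) 0 []

-- ===== PORT B =====
def can_swap_to_goal_alt (s : String) (goal : String) : Bool :=
  if PySem.Str.len s ≠ PySem.Str.len goal then false
  else
    let diffs := (s.toList.zip goal.toList).filter (fun p => p.1 ≠ p.2)
    decide (diffs.length = 2) &&
      decide (PySem.List.sorted s.toList (fun x => x) false
              = PySem.List.sorted goal.toList (fun x => x) false)

-- ===== PRECONDITION & SPEC =====
def Spec_can_swap_to_goal (s : String) (goal : String) (out : Bool) : Prop := out = can_swap_to_goal_alt s goal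
instance (s : String) (goal : String) (out : Bool) : Decidable (Spec_can_swap_to_goal s goal out) := by unfold Spec_can_swap_to_goal; infer_instance

-- ===== CLAIM (what is proved, stated in full; the proofs are below) =====
def Claim_equal_can_swap_to_goal : Prop := ∀ (s : String) (goal : String), Dom_can_swap_to_goal s goal → Spec_can_swap_to_goal s goal (can_swap_to_goal s goal)

-- ===== LEMMAS AND PROOFS =====

-- the character pair at index i of the two strings
def pvPairAt (S G : List Char) (i : Int) : Char × Char :=
  (PySem.List.pyGetD S i ' ', PySem.List.pyGetD G i ' ')

-- A's crosswise check on a list of stored indices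
def pvCross (S G : List Char) (l : List Int) : Bool :=
  (PySem.List.pyGetD S (PySem.List.pyGetD l 0 0) ' ' == PySem.List.pyGetD G (PySem.List.pyGetD l 1 0) ' ') &&
  (PySem.List.pyGetD S (PySem.List.pyGetD l 1 0) ' ' == PySem.List.pyGetD G (PySem.List.pyGetD l 0 0) ' ')

-- mismatch predicate on indices
def pvMis (S G : List Char) (i : Int) : Bool :=
  decide (PySem.List.pyGetD S i ' ' ≠ PySem.List.pyGetD G i ' ')

-- closed form of A's loop: it returns ⟦total diff count = 2⟧ && cross-check on all mismatch indices
theorem pvLoopA_run (S G : List Char) :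
    ∀ (is : List Int) (dc : Int) (di : List Int),
      pvLoopA S G is dc di =
        (decide (dc + ((is.filter (pvMis S G)).length : Int) = 2) &&
         pvCross S G (di ++ is.filter (pvMis S G))) := by
  intro is
  induction is with
  | nil =>
      intro dc di
      simp [pvLoopA, pvFinalA, pvCross, Bool.and_assoc]
  | cons i rest ih =>
      intro dc di
      by_cases h : PySem.List.pyGetD S i ' ' ≠ PySem.List.pyGetD G i ' '
      · have hm : pvMis S G i = true := by simp [pvMis, h]
        have hfc : (i :: rest).filter (pvMis S G) = i :: rest.filter (pvMis S G) := by
          simp [List.filter_cons, hm]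
        by_cases h2 : dc + 1 > 2
        · have hcnt : decide (dc + (((i :: rest).filter (pvMis S G)).length : Int) = 2) = false := by
            rw [hfc]
            have : (0:Int) ≤ ((rest.filter (pvMis S G)).length : Int) := Int.natCast_nonneg _
            simp only [List.length_cons, decide_eq_false_iff_not]
            push_cast
            omega
          simp [pvLoopA, h, h2, hcnt]
        · have hstep : pvLoopA S G (i :: rest) dc di = pvLoopA S G rest (dc + 1) (di ++ [i]) := by
            simp [pvLoopA, h, h2]
          rw [hstep, ih, hfc]
          have hcnt : decide (dc + 1 + ((rest.filter (pvMis S G)).length : Int) = 2)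
              = decide (dc + (((i :: rest.filter (pvMis S G)) : List Int).length : Int) = 2) := by
            apply decide_eq_decide.mpr
            push_cast [List.length_cons]
            omega
          rw [hcnt, List.append_assoc, List.singleton_append]
      · have h' : PySem.List.pyGetD S i ' ' = PySem.List.pyGetD G i ' ' := not_not.1 h
        have hm : pvMis S G i = false := by simp [pvMis, h']
        have hfc : (i :: rest).filter (pvMis S G) = rest.filter (pvMis S G) := by
          simp [List.filter_cons, hm]
        by_cases h2 : dc > 2
        · have hcnt : decide (dc + (((i :: rest).filter (pvMis S G)).length : Int) = 2) = false := by
            have : (0:Int) ≤ (((i :: rest).filter (pvMis S G)).length : Int) := Int.natCast_nonneg _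
            simp only [decide_eq_false_iff_not]
            omega
          simp [pvLoopA, h, h2, hcnt]
        · have hstep : pvLoopA S G (i :: rest) dc di = pvLoopA S G rest dc di := by
            simp [pvLoopA, h, h2]
          rw [hstep, ih, hfc]

-- mapping the index range through (s[i], goal[i]) gives zip(s, goal)
theorem pvPairAt_range (S G : List Char) (h : S.length = G.length) :
    (PySem.List.pyRange 0 (S.length : Int) 1).map (pvPairAt S G) = S.zip G := by
  apply List.ext_getElem
  · simp [PySem.List.length_pyRange_one, h]
  · intro k h1 h2
    have hk : k < S.length := by
      simpa [PySem.List.length_pyRange_one, h] using h1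
    have hr : (PySem.List.pyRange 0 (S.length : Int) 1)[k]'(by
        simpa [PySem.List.length_pyRange_one] using hk) = (k : Int) := by
      simp [PySem.List.getElem_pyRange_one]
    simp only [List.getElem_map, hr, pvPairAt, PySem.List.pyGetD_natCast, List.getElem_zip]
    have hkG : k < G.length := h ▸ hk
    simp [List.getD_eq_getElem?_getD, hk, hkG]

-- the filtered index list, mapped through pvPairAt, is B's diffs list
theorem pvIdx_map (S G : List Char) (h : S.length = G.length) :
    ((PySem.List.pyRange 0 (S.length : Int) 1).filter (pvMis S G)).map (pvPairAt S G)
      = (S.zip G).filter (fun p => p.1 ≠ p.2) := by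
  rw [← pvPairAt_range S G h]
  have : ∀ (l : List Int),
      (l.filter (pvMis S G)).map (pvPairAt S G)
        = (l.map (pvPairAt S G)).filter (fun p => decide (p.1 ≠ p.2)) := by
    intro l
    induction l with
    | nil => simp
    | cons i rest ih =>
        by_cases hi : PySem.List.pyGetD S i ' ' = PySem.List.pyGetD G i ' '
        · have hm : pvMis S G i = false := by simp [pvMis, hi]
          have hp : (pvPairAt S G i).1 = (pvPairAt S G i).2 := by simp [pvPairAt, hi]
          simp [List.filter_cons, hm, hp, ih]
        · have hm : pvMis S G i = true := by simp [pvMis, hi]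
          have hp : ¬ (pvPairAt S G i).1 = (pvPairAt S G i).2 := by simp [pvPairAt, hi]
          simp [List.filter_cons, hm, hp, ih]
  exact this _

-- multiset balance: s + (mismatched goal chars) = goal + (mismatched s chars)
theorem pvBalance : ∀ (S G : List Char), S.length = G.length →
    ((S : Multiset Char) + (((S.zip G).filter (fun p => p.1 ≠ p.2)).map Prod.snd : List Char))
      = ((G : Multiset Char) + (((S.zip G).filter (fun p => p.1 ≠ p.2)).map Prod.fst : List Char)) := by
  intro S
  induction S with
  | nil => intro G hG; cases G <;> simp_all
  | cons a S ih =>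
      intro G hG
      cases G with
      | nil => simp at hG
      | cons b G =>
          have hG' : S.length = G.length := by simpa using hG
          have IH := ih G hG'
          by_cases hab : a = b
          · subst hab
            have hfc : ((a, a) :: S.zip G).filter (fun p => decide (p.1 ≠ p.2))
                = (S.zip G).filter (fun p => decide (p.1 ≠ p.2)) := by
              simp [List.filter_cons]
            simp only [List.zip_cons_cons, hfc, ← Multiset.cons_coe, Multiset.cons_add]
            rw [IH]
          · have hfc : ((a, b) :: S.zip G).filter (fun p => decide (p.1 ≠ p.2))
                = (a, b) :: (S.zip G).filter (fun p => decide (p.1 ≠ p.2)) := by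
              simp [List.filter_cons, hab]
            simp only [List.zip_cons_cons, hfc, List.map_cons, ← Multiset.cons_coe,
              Multiset.cons_add, Multiset.add_cons]
            rw [IH]
            exact Multiset.cons_swap _ _ _

-- s ~ goal  ↔  mismatched s chars ~ mismatched goal chars (as multisets)
theorem pvPermIff (S G : List Char) (h : S.length = G.length) :
    ((S : Multiset Char) = (G : Multiset Char))
      ↔ ((((S.zip G).filter (fun p => p.1 ≠ p.2)).map Prod.fst : List Char) : Multiset Char)
        = ((((S.zip G).filter (fun p => p.1 ≠ p.2)).map Prod.snd : List Char) : Multiset Char) := by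
  have hb := pvBalance S G h
  constructor
  · intro hSG
    rw [hSG] at hb
    exact (add_right_injective _ hb).symm
  · intro hfs
    rw [← hfs] at hb
    exact add_left_injective _ hb

-- two-element multiset equation under the mismatch constraints
theorem pvPairMs (a b c d : Char) (hab : a ≠ b) (hcd : c ≠ d) :
    (({a, c} : Multiset Char) = {b, d}) ↔ (a = d ∧ c = b) := by
  constructor
  · intro hmc
    have h1 : ({a, c} : Multiset Char) = a ::ₘ {c} := rfl
    have h2 : ({b, d} : Multiset Char) = b ::ₘ {d} := rfl
    rw [h1, h2] at hmc
    rcases Multiset.cons_eq_cons.1 hmc with ⟨hab', _⟩ | ⟨_, cs, hc1, hc2⟩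
    · exact absurd hab' hab
    · rcases (Multiset.singleton_eq_cons_iff cs).1 hc1 with ⟨hcb, hcs⟩
      subst hcs
      rcases (Multiset.singleton_eq_cons_iff 0).1 hc2 with ⟨hda, _⟩
      exact ⟨hda.symm, hcb⟩
  · rintro ⟨rfl, rfl⟩
    exact Multiset.pair_comm _ _

-- the core equality, at list level, after A's loop has been put in closed form
theorem pvMain (S G : List Char) (hL : S.length = G.length) :
    (decide ((0:Int) + ((((PySem.List.pyRange 0 (S.length : Int) 1).filter (pvMis S G)).length : Nat) : Int) = 2) &&
     pvCross S G ([] ++ (PySem.List.pyRange 0 (S.length : Int) 1).filter (pvMis S G)))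
      = (decide (((S.zip G).filter (fun p => p.1 ≠ p.2)).length = 2) &&
         decide (PySem.List.sorted S (fun x => x) false = PySem.List.sorted G (fun x => x) false)) := by
  rw [List.nil_append]
  have hmap := pvIdx_map S G hL
  have hlen2 : ((PySem.List.pyRange 0 (S.length : Int) 1).filter (pvMis S G)).length
      = ((S.zip G).filter (fun p => p.1 ≠ p.2)).length := by
    rw [← hmap, List.length_map]
  have hcnt : decide ((0:Int) + ((((PySem.List.pyRange 0 (S.length : Int) 1).filter (pvMis S G)).length : Nat) : Int) = 2)
      = decide (((S.zip G).filter (fun p => p.1 ≠ p.2)).length = 2) := by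
    apply decide_eq_decide.mpr
    rw [hlen2]
    push_cast
    omega
  rw [hcnt]
  by_cases h2 : ((S.zip G).filter (fun p => p.1 ≠ p.2)).length = 2
  · obtain ⟨i0, i1, hidxe⟩ := List.length_eq_two.1 (hlen2.trans h2)
    obtain ⟨p0, p1, hdse⟩ := List.length_eq_two.1 h2
    obtain ⟨a, b⟩ := p0
    obtain ⟨c, d⟩ := p1
    rw [hidxe, hdse] at hmap
    simp only [List.map_cons, List.map_nil, List.cons.injEq, and_true] at hmap
    obtain ⟨hp0, hp1⟩ := hmap
    have hmem0 : ((a, b) : Char × Char) ∈ (S.zip G).filter (fun p => p.1 ≠ p.2) := by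
      rw [hdse]; simp
    have hmem1 : ((c, d) : Char × Char) ∈ (S.zip G).filter (fun p => p.1 ≠ p.2) := by
      rw [hdse]; simp
    have hab : a ≠ b := by have := List.of_mem_filter hmem0; simpa using this
    have hcd : c ≠ d := by have := List.of_mem_filter hmem1; simpa using this
    have e0 : PySem.List.pyGetD S i0 ' ' = a := congrArg Prod.fst hp0
    have e0' : PySem.List.pyGetD G i0 ' ' = b := congrArg Prod.snd hp0
    have e1 : PySem.List.pyGetD S i1 ' ' = c := congrArg Prod.fst hp1
    have e1' : PySem.List.pyGetD G i1 ' ' = d := congrArg Prod.snd hp1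
    have hcross : pvCross S G [i0, i1] = ((a == d) && (c == b)) := by
      have g0 : PySem.List.pyGetD ([i0, i1] : List Int) 0 0 = i0 := by
        simp [PySem.List.pyGetD, PySem.List.pyIdx?]
      have g1 : PySem.List.pyGetD ([i0, i1] : List Int) 1 0 = i1 := by
        simp [PySem.List.pyGetD, PySem.List.pyIdx?]
      rw [pvCross, g0, g1, e0, e0', e1, e1']
    have hsorted :
        (PySem.List.sorted S (fun x => x) false = PySem.List.sorted G (fun x => x) false)
          ↔ (a = d ∧ c = b) := by
      rw [PySem.List.sorted_id_eq_sorted_id_iff_perm, ← Multiset.coe_eq_coe,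
        pvPermIff S G hL, hdse]
      simp only [List.map_cons, List.map_nil]
      exact pvPairMs a b c d hab hcd
    rw [hidxe, hcross]
    have hdt : decide (((S.zip G).filter (fun p => p.1 ≠ p.2)).length = 2) = true :=
      decide_eq_true h2
    rw [hdt, Bool.true_and, Bool.true_and]
    by_cases hfin : a = d ∧ c = b
    · have hst : decide (PySem.List.sorted S (fun x => x) false
          = PySem.List.sorted G (fun x => x) false) = true := by
        simp [hsorted.2 hfin]
      rw [hst, hfin.1, hfin.2]
      simp
    · have hst : decide (PySem.List.sorted S (fun x => x) false
          = PySem.List.sorted G (fun x => x) false) = false :=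
        decide_eq_false (fun hc => hfin (hsorted.1 hc))
      rw [hst]
      rcases not_and_or.1 hfin with h | h <;> simp [h]
  · rw [decide_eq_false h2]
    simp

-- ===== VERDICT (by name: the statement is the Claim_ definition above) =====
theorem can_swap_to_goal_spec : Claim_equal_can_swap_to_goal := by
  intro s goal _dom
  unfold Spec_can_swap_to_goal
  simp only [can_swap_to_goal, can_swap_to_goal_alt]
  by_cases hlen : PySem.Str.len s = PySem.Str.len goal
  · rw [if_neg (not_not_intro hlen), if_neg (not_not_intro hlen)]
    have hL : s.toList.length = goal.toList.length := by
      have h := hlen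
      simp only [PySem.Str.len_eq] at h
      exact_mod_cast h
    have hlenS : PySem.Str.len s = ((s.toList.length : Nat) : Int) := by
      rw [PySem.Str.len_eq]
    rw [hlenS, pvLoopA_run]
    exact pvMain s.toList goal.toList hL
  · rw [if_pos (by exact hlen), if_pos (by exact hlen)]
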